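-- pv_equiv track=rewrite | github.com/mehroj-r/dictionary_app | functions.py | json_to_html
-- ===== SOURCE A (Python) =====
-- def json_to_html(definitions):
--     html_sample_light = ""
--     html_sample_dark = ""
--     count = 1
--
--     list_pfs = list(definitions.keys())
--
--     for pfs in list_pfs:
--         html_sample_dark += f"<h5 style='color: #ffffff;'>{pfs.title()}</h5>"
--         html_sample_light += f"<h5 style='color: #000000;'>{pfs.title()}</h5>"
--         for definition in definitions[pfs]:
--             html_sample_dark += f"<p style='color: #ffffff; font-size: 12px;'>‎ {count}. {definition}</p>"
--             html_sample_light += f"<p style='color: #000000; font-size: 12px;'>‎ {count}. {definition}</p>"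
--             count += 1
--         if list_pfs[-1] != pfs:
--             html_sample_dark += "<div style='font-size: 1px;'>‎</div>"
--             html_sample_light += "<div style='font-size: 1px;'>‎</div>"
--         count = 1
--
--     return html_sample_light, html_sample_dark
-- ===== SOURCE B (Python) =====
-- def json_to_html(definitions):
--     # Build ONE color-agnostic token stream (None = color slot), then render it twice.
--     toks = []
--     for k, v in definitions.items():
--         if toks:
--             toks.append("<div style='font-size: 1px;'>\u200e</div>")
--         toks += ["<h5 style='color: ", None, ";'>", k.title(), "</h5>"]
--         i = 1
--         for d in v:
--             toks += ["<p style='color: ", None, "; font-size: 12px;'>\u200e ", str(i), ". ", d, "</p>"]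
--             i += 1
--     def render(color):
--         return "".join(color if t is None else t for t in toks)
--     return render("#000000"), render("#ffffff")
-- ===== Notes on version B (the rewrite author's own statement) =====
-- stated objective: alternative
-- what changed: A builds two parallel light/dark HTML strings in one interleaved pass with a running counter and a last-key check; B instead builds a single color-agnostic token stream (None marking color slots, divider inserted before every non-first section) and then renders it twice, once per color, by joining the tokens.
import Mathlib
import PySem

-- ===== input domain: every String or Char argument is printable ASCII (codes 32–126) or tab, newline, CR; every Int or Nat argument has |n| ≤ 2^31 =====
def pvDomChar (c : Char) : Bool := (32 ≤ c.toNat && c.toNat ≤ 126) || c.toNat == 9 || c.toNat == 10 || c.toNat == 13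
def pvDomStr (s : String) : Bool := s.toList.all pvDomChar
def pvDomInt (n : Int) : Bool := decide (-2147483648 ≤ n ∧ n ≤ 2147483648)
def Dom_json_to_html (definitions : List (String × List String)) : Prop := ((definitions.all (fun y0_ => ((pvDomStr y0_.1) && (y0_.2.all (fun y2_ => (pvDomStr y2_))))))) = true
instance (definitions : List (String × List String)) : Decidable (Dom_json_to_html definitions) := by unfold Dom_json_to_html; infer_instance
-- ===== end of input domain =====

-- B builds one color-agnostic token stream and renders it per color, instead of A's
-- two interleaved running strings with a last-key check; equivalence proved on
-- assoc lists with distinct keys (the ones that represent a Python dict).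


-- ===== PORT A =====
-- hand port of Python str.title() (exact for ASCII: a cased char after a cased char
-- is lowercased, after a non-cased char uppercased; shared by both ports)
def pyTitle (prev : Bool) : List Char → List Char
  | [] => []
  | c :: cs =>
    if PySem.Chars.isalpha c then
      (if prev then PySem.Chars.lowerChar c else PySem.Chars.upperChar c) :: pyTitle true cs
    else c :: pyTitle false cs

def json_to_html (definitions : List (String × List String)) : String × String :=
  let d := PySem.Dict.mk definitions
  let list_pfs := d.keys
  let res := list_pfs.foldl (fun (st : List Char × List Char × Int) pfs =>
    let dark := st.2.1 ++ "<h5 style='color: #ffffff;'>".toList ++ pyTitle false pfs.toList ++ "</h5>".toList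
    let light := st.1 ++ "<h5 style='color: #000000;'>".toList ++ pyTitle false pfs.toList ++ "</h5>".toList
    -- definitions[pfs]: pfs comes from d.keys, so this lookup cannot raise; getD [] is exact here
    let st2 := ((d.get? pfs).getD []).foldl (fun (st2 : List Char × List Char × Int) defn =>
      (st2.1 ++ "<p style='color: #000000; font-size: 12px;'>‎ ".toList ++ (PySem.Int.toStr st2.2.2).toList ++ ". ".toList ++ defn.toList ++ "</p>".toList,
       st2.2.1 ++ "<p style='color: #ffffff; font-size: 12px;'>‎ ".toList ++ (PySem.Int.toStr st2.2.2).toList ++ ". ".toList ++ defn.toList ++ "</p>".toList,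
       st2.2.2 + 1)) (light, dark, st.2.2)
    if PySem.List.pyGet? list_pfs (-1) ≠ some pfs then
      (st2.1 ++ "<div style='font-size: 1px;'>‎</div>".toList,
       st2.2.1 ++ "<div style='font-size: 1px;'>‎</div>".toList, 1)
    else (st2.1, st2.2.1, 1))
    ([], [], 1)
  (String.ofList res.1, String.ofList res.2.1)

-- ===== PORT B =====
def json_to_html_alt (definitions : List (String × List String)) : String × String :=
  let toks := (PySem.Dict.mk definitions).items.foldl (fun (toks : List (Option String)) kv =>
    let toks := if toks ≠ [] then toks ++ [some "<div style='font-size: 1px;'>‎</div>"] else toks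
    let toks := toks ++ [some "<h5 style='color: ", none, some ";'>", some (String.ofList (pyTitle false kv.1.toList)), some "</h5>"]
    (kv.2.foldl (fun (st : List (Option String) × Int) dfn =>
      (st.1 ++ [some "<p style='color: ", none, some "; font-size: 12px;'>‎ ", some (PySem.Int.toStr st.2), some ". ", some dfn, some "</p>"],
       st.2 + 1)) (toks, 1)).1) []
  let render := fun (color : String) => PySem.Str.join "" (toks.map (fun t => t.getD color))
  (render "#000000", render "#ffffff")

-- ===== PRECONDITION & SPEC =====
-- Pre_ excludes assoc lists with duplicate keys: they do not represent any Python dict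
-- (dict construction collapses duplicates), so A's behaviour on them is a representation artefact.
def Pre_json_to_html (definitions : List (String × List String)) : Prop :=
  (definitions.map Prod.fst).Nodup
instance (definitions : List (String × List String)) : Decidable (Pre_json_to_html definitions) := by
  unfold Pre_json_to_html; infer_instance

def pvWitness_json_to_html : (List (String × List String)) :=
  [("noun", ["a thing", "an object"]), ("verb", ["to act"])]

def Spec_json_to_html (definitions : List (String × List String)) (out : String × String) : Prop :=
  out = json_to_html_alt definitions
instance (definitions : List (String × List String)) (out : String × String) : Decidable (Spec_json_to_html definitions out) := by
  unfold Spec_json_to_html; infer_instance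

-- ===== CLAIM =====
def Claim_equal_json_to_html : Prop :=
  ∀ (definitions : List (String × List String)), Dom_json_to_html definitions →
    Pre_json_to_html definitions → Spec_json_to_html definitions (json_to_html definitions)

-- ===== LEMMAS AND PROOFS =====

-- the common shape of both outputs, over character lists
def divC : List Char := "<div style='font-size: 1px;'>‎</div>".toList
def numC (c : List Char) : Int → List String → List Char
  | _, [] => []
  | i, dfn :: ds =>
    "<p style='color: ".toList ++ c ++ "; font-size: 12px;'>‎ ".toList ++
      (PySem.Int.toStr i).toList ++ ". ".toList ++ dfn.toList ++ "</p>".toList ++ numC c (i + 1) ds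
def secC (c : List Char) (p : String) (v : List String) : List Char :=
  "<h5 style='color: ".toList ++ c ++ ";'>".toList ++ pyTitle false p.toList ++ "</h5>".toList ++ numC c 1 v
def tailC (c : List Char) : List (String × List String) → List Char
  | [] => []
  | kv :: xs => divC ++ secC c kv.1 kv.2 ++ tailC c xs
def outC (c : List Char) : List (String × List String) → List Char
  | [] => []
  | kv :: xs => secC c kv.1 kv.2 ++ tailC c xs

-- literal-splitting facts
theorem pB_split : "<p style='color: #000000; font-size: 12px;'>‎ ".toList =
    "<p style='color: ".toList ++ "#000000".toList ++ "; font-size: 12px;'>‎ ".toList := by decide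
theorem pW_split : "<p style='color: #ffffff; font-size: 12px;'>‎ ".toList =
    "<p style='color: ".toList ++ "#ffffff".toList ++ "; font-size: 12px;'>‎ ".toList := by decide
theorem hB_split : "<h5 style='color: #000000;'>".toList =
    "<h5 style='color: ".toList ++ "#000000".toList ++ ";'>".toList := by decide
theorem hW_split : "<h5 style='color: #ffffff;'>".toList =
    "<h5 style='color: ".toList ++ "#ffffff".toList ++ ";'>".toList := by decide

-- ===== A side =====
-- A's loop body over the key list (lookup form) and over the pairs (clean form)
def stepKeyA (defs : List (String × List String)) (st : List Char × List Char × Int) (pfs : String) : List Char × List Char × Int :=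
  let dark := st.2.1 ++ "<h5 style='color: #ffffff;'>".toList ++ pyTitle false pfs.toList ++ "</h5>".toList
  let light := st.1 ++ "<h5 style='color: #000000;'>".toList ++ pyTitle false pfs.toList ++ "</h5>".toList
  let st2 := (((PySem.Dict.mk defs).get? pfs).getD []).foldl (fun (st2 : List Char × List Char × Int) defn =>
    (st2.1 ++ "<p style='color: #000000; font-size: 12px;'>‎ ".toList ++ (PySem.Int.toStr st2.2.2).toList ++ ". ".toList ++ defn.toList ++ "</p>".toList,
     st2.2.1 ++ "<p style='color: #ffffff; font-size: 12px;'>‎ ".toList ++ (PySem.Int.toStr st2.2.2).toList ++ ". ".toList ++ defn.toList ++ "</p>".toList,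
     st2.2.2 + 1)) (light, dark, st.2.2)
  if (defs.map Prod.fst).getLast? ≠ some pfs then
    (st2.1 ++ "<div style='font-size: 1px;'>‎</div>".toList,
     st2.2.1 ++ "<div style='font-size: 1px;'>‎</div>".toList, 1)
  else (st2.1, st2.2.1, 1)

def stepA (K : Option String) (st : List Char × List Char × Int) (kv : String × List String) : List Char × List Char × Int :=
  let dark := st.2.1 ++ "<h5 style='color: #ffffff;'>".toList ++ pyTitle false kv.1.toList ++ "</h5>".toList
  let light := st.1 ++ "<h5 style='color: #000000;'>".toList ++ pyTitle false kv.1.toList ++ "</h5>".toList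
  let st2 := kv.2.foldl (fun (st2 : List Char × List Char × Int) defn =>
    (st2.1 ++ "<p style='color: #000000; font-size: 12px;'>‎ ".toList ++ (PySem.Int.toStr st2.2.2).toList ++ ". ".toList ++ defn.toList ++ "</p>".toList,
     st2.2.1 ++ "<p style='color: #ffffff; font-size: 12px;'>‎ ".toList ++ (PySem.Int.toStr st2.2.2).toList ++ ". ".toList ++ defn.toList ++ "</p>".toList,
     st2.2.2 + 1)) (light, dark, st.2.2)
  if K ≠ some kv.1 then
    (st2.1 ++ "<div style='font-size: 1px;'>‎</div>".toList,
     st2.2.1 ++ "<div style='font-size: 1px;'>‎</div>".toList, 1)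
  else (st2.1, st2.2.1, 1)

theorem A_inner (v : List String) (L D : List Char) (i : Int) :
    v.foldl (fun (st2 : List Char × List Char × Int) defn =>
      (st2.1 ++ "<p style='color: #000000; font-size: 12px;'>‎ ".toList ++ (PySem.Int.toStr st2.2.2).toList ++ ". ".toList ++ defn.toList ++ "</p>".toList,
       st2.2.1 ++ "<p style='color: #ffffff; font-size: 12px;'>‎ ".toList ++ (PySem.Int.toStr st2.2.2).toList ++ ". ".toList ++ defn.toList ++ "</p>".toList,
       st2.2.2 + 1)) (L, D, i)
    = (L ++ numC "#000000".toList i v, D ++ numC "#ffffff".toList i v, i + v.length) := by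
  induction v generalizing L D i with
  | nil => simp [numC]
  | cons dfn ds ih =>
    rw [List.foldl_cons]
    rw [show ∀ a b c, List.foldl _ (a,b,c) ds = _ from fun a b c => ih a b c]
    simp only [numC, pB_split, pW_split, List.append_assoc, List.length_cons, Prod.mk.injEq]
    refine ⟨by trivial, by trivial, ?_⟩
    push_cast; ring

theorem A_outer (K : Option String) (l : List (String × List String)) (L D : List Char)
    (hnd : (l.map Prod.fst).Nodup) (hK : l ≠ [] → K = (l.map Prod.fst).getLast?) :
    l.foldl (stepA K) (L, D, 1)
    = (L ++ outC "#000000".toList l, D ++ outC "#ffffff".toList l, 1) := by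
  induction l generalizing L D with
  | nil => simp [outC]
  | cons kv xs ih =>
    rw [List.foldl_cons]
    have hstep : stepA K (L, D, 1) kv =
        if K ≠ some kv.1 then
          (L ++ secC "#000000".toList kv.1 kv.2 ++ divC, D ++ secC "#ffffff".toList kv.1 kv.2 ++ divC, 1)
        else (L ++ secC "#000000".toList kv.1 kv.2, D ++ secC "#ffffff".toList kv.1 kv.2, 1) := by
      simp only [stepA]
      rw [A_inner]
      simp only [secC, hB_split, hW_split, divC, List.append_assoc]
    cases xs with
    | nil =>
      have hKeq : K = some kv.1 := by simpa using hK (by simp)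
      rw [hstep]
      simp [hKeq, outC, tailC]
    | cons y ys =>
      have hlast : K = ((y :: ys).map Prod.fst).getLast? := by
        rw [hK (by simp)]; simp only [List.map_cons, List.getLast?_cons_cons]
      have hKne : K ≠ some kv.1 := by
        rw [hlast]
        intro hcontra
        have hmem : kv.1 ∈ (y :: ys).map Prod.fst := List.mem_of_getLast? hcontra
        simp only [List.map_cons, List.nodup_cons] at hnd
        exact hnd.1 hmem
      rw [hstep, if_pos hKne]
      have hnd' : ((y :: ys).map Prod.fst).Nodup := by
        simp only [List.map_cons, List.nodup_cons] at hnd ⊢; exact hnd.2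
      rw [ih _ _ hnd' (fun _ => hlast)]
      simp [outC, tailC, List.append_assoc]

-- ===== B side =====
def tokNum : Int → List String → List (Option String)
  | _, [] => []
  | i, d :: ds => [some "<p style='color: ", none, some "; font-size: 12px;'>‎ ",
      some (PySem.Int.toStr i), some ". ", some d, some "</p>"] ++ tokNum (i + 1) ds
def tokSec (kv : String × List String) : List (Option String) :=
  [some "<h5 style='color: ", none, some ";'>", some (String.ofList (pyTitle false kv.1.toList)), some "</h5>"] ++ tokNum 1 kv.2
def tokTail : List (String × List String) → List (Option String)
  | [] => []
  | kv :: xs => some "<div style='font-size: 1px;'>‎</div>" :: (tokSec kv ++ tokTail xs)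
def tokOut : List (String × List String) → List (Option String)
  | [] => []
  | kv :: xs => tokSec kv ++ tokTail xs

-- B's loop body
def stepB (toks : List (Option String)) (kv : String × List String) : List (Option String) :=
  let toks := if toks ≠ [] then toks ++ [some "<div style='font-size: 1px;'>‎</div>"] else toks
  let toks := toks ++ [some "<h5 style='color: ", none, some ";'>", some (String.ofList (pyTitle false kv.1.toList)), some "</h5>"]
  (kv.2.foldl (fun (st : List (Option String) × Int) dfn =>
    (st.1 ++ [some "<p style='color: ", none, some "; font-size: 12px;'>‎ ", some (PySem.Int.toStr st.2), some ". ", some dfn, some "</p>"],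
     st.2 + 1)) (toks, 1)).1

theorem B_inner (v : List String) (toks : List (Option String)) (i : Int) :
    v.foldl (fun (st : List (Option String) × Int) dfn =>
      (st.1 ++ [some "<p style='color: ", none, some "; font-size: 12px;'>‎ ", some (PySem.Int.toStr st.2), some ". ", some dfn, some "</p>"],
       st.2 + 1)) (toks, i)
    = (toks ++ tokNum i v, i + v.length) := by
  induction v generalizing toks i with
  | nil => simp [tokNum]
  | cons d ds ih =>
    rw [List.foldl_cons]
    rw [show ∀ a b, List.foldl _ (a,b) ds = _ from fun a b => ih a b]
    simp only [tokNum, List.append_assoc, List.length_cons, Prod.mk.injEq]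
    refine ⟨by trivial, ?_⟩
    push_cast; ring

theorem B_step (toks : List (Option String)) (kv : String × List String) :
    stepB toks kv = (if toks ≠ [] then toks ++ [some "<div style='font-size: 1px;'>‎</div>"] else toks) ++ tokSec kv := by
  simp only [stepB]
  rw [B_inner]
  simp only [tokSec, List.append_assoc]

theorem B_outer (l : List (String × List String)) (toks : List (Option String)) (h : toks ≠ []) :
    l.foldl stepB toks = toks ++ tokTail l := by
  induction l generalizing toks with
  | nil => simp [tokTail]
  | cons kv xs ih =>
    rw [List.foldl_cons, B_step, if_pos h]
    rw [ih _ (by simp)]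
    simp [tokTail, List.append_assoc]

theorem B_out (l : List (String × List String)) :
    l.foldl stepB [] = tokOut l := by
  cases l with
  | nil => simp [tokOut]
  | cons kv xs =>
    rw [List.foldl_cons, B_step]
    have h0 : (if ([] : List (Option String)) ≠ [] then ([] : List (Option String)) ++ [some "<div style='font-size: 1px;'>‎</div>"] else []) = [] := by simp
    rw [h0, List.nil_append]
    rw [B_outer xs _ (by simp [tokSec])]
    simp [tokOut]

-- rendering tokens to characters
def rendC (c : List Char) (t : List (Option String)) : List Char :=
  (t.map (fun o => match o with | none => c | some s => s.toList)).flatten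

theorem chars_join_nil_sep (ps : List (List Char)) : PySem.Chars.join [] ps = ps.flatten := by
  induction ps with
  | nil => simp [PySem.Chars.join_nil]
  | cons a ps ih =>
    cases ps with
    | nil => simp [PySem.Chars.join_singleton]
    | cons b rest => rw [PySem.Chars.join_cons_cons, ih]; simp

theorem render_eq (color : String) (t : List (Option String)) :
    (PySem.Str.join "" (t.map (fun o => o.getD color))).toList = rendC color.toList t := by
  rw [PySem.Str.toList_join]
  show PySem.Chars.join "".toList _ = _
  have h : ("" : String).toList = [] := rfl
  rw [h, chars_join_nil_sep, rendC, List.map_map]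
  congr 1
  apply List.map_congr_left
  intro o _
  cases o <;> rfl

theorem rend_append (c : List Char) (a b : List (Option String)) :
    rendC c (a ++ b) = rendC c a ++ rendC c b := by
  simp [rendC]

theorem rend_num (c : List Char) (v : List String) (i : Int) :
    rendC c (tokNum i v) = numC c i v := by
  induction v generalizing i with
  | nil => simp [tokNum, numC, rendC]
  | cons d ds ih => simp [tokNum, numC, rendC, List.append_assoc] at ih ⊢; simp [ih]

theorem rend_sec (c : List Char) (kv : String × List String) :
    rendC c (tokSec kv) = secC c kv.1 kv.2 := by
  rw [tokSec, rend_append, rend_num]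
  simp [rendC, secC, String.toList_ofList, List.append_assoc]

theorem rend_tail (c : List Char) (l : List (String × List String)) :
    rendC c (tokTail l) = tailC c l := by
  induction l with
  | nil => simp [tokTail, tailC, rendC]
  | cons kv xs ih =>
    show rendC c ([some "<div style='font-size: 1px;'>‎</div>"] ++ (tokSec kv ++ tokTail xs)) = _
    rw [rend_append, rend_append, rend_sec, ih]
    simp [tailC, divC, rendC]

theorem rend_out (c : List Char) (l : List (String × List String)) :
    rendC c (tokOut l) = outC c l := by
  cases l with
  | nil => simp [tokOut, outC, rendC]
  | cons kv xs =>
    show rendC c (tokSec kv ++ tokTail xs) = _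
    rw [rend_append, rend_sec, rend_tail, outC]

theorem alt_eq (definitions : List (String × List String)) :
    json_to_html_alt definitions =
      (String.ofList (outC "#000000".toList definitions), String.ofList (outC "#ffffff".toList definitions)) := by
  have hfold : definitions.foldl stepB [] = tokOut definitions := B_out definitions
  have h1 : ∀ color : String, PySem.Str.join "" ((tokOut definitions).map (fun t => t.getD color)) =
      String.ofList (outC color.toList definitions) := by
    intro color
    have h := congrArg String.ofList (render_eq color (tokOut definitions))
    rw [String.ofList_toList] at h
    rw [h, rend_out]
  calc json_to_html_alt definitions
      = (PySem.Str.join "" ((definitions.foldl stepB []).map (fun t => t.getD "#000000")),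
         PySem.Str.join "" ((definitions.foldl stepB []).map (fun t => t.getD "#ffffff"))) := rfl
    _ = _ := by rw [hfold, h1, h1]

theorem a_eq (definitions : List (String × List String)) (pre : Pre_json_to_html definitions) :
    json_to_html definitions =
      (String.ofList (outC "#000000".toList definitions), String.ofList (outC "#ffffff".toList definitions)) := by
  have hnd : ((PySem.Dict.mk definitions).keys).Nodup := by
    simpa [PySem.Dict.keys] using pre
  have step2 : (definitions.map Prod.fst).foldl (stepKeyA definitions) ([], [], 1)
      = definitions.foldl (fun st kv => stepKeyA definitions st kv.1) ([], [], 1) :=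
    List.foldl_map ..
  have step3 : definitions.foldl (fun st kv => stepKeyA definitions st kv.1) ([], [], 1)
      = definitions.foldl (stepA ((definitions.map Prod.fst).getLast?)) ([], [], 1) := by
    apply PySem.List.foldl_congr_mem'
    intro kv hkv st
    have hget : (PySem.Dict.mk definitions).get? kv.1 = some kv.2 :=
      PySem.Dict.get?_of_mem_items _ hkv hnd
    simp [stepKeyA, stepA, hget]
  have step4 : definitions.foldl (stepA ((definitions.map Prod.fst).getLast?)) ([], [], 1)
      = ([] ++ outC "#000000".toList definitions, [] ++ outC "#ffffff".toList definitions, 1) :=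
    A_outer _ _ _ _ pre (fun _ => rfl)
  have hkeys : (PySem.Dict.mk definitions).keys = definitions.map Prod.fst := by
    simp [PySem.Dict.keys]
  calc json_to_html definitions
      = (String.ofList (((PySem.Dict.mk definitions).keys).foldl (stepKeyA definitions) ([], [], 1)).1,
         String.ofList (((PySem.Dict.mk definitions).keys).foldl (stepKeyA definitions) ([], [], 1)).2.1) := by
        unfold json_to_html
        simp only [hkeys, PySem.List.pyGet?_neg_one]
        rfl
    _ = _ := by rw [hkeys, step2, step3, step4]; simp

-- ===== VERDICT =====
theorem json_to_html_spec : Claim_equal_json_to_html := by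
  intro definitions _dom pre
  unfold Spec_json_to_html
  rw [a_eq definitions pre, alt_eq definitions]
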